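-- pv_equiv track=rewrite | github.com/PushkarPrabhath27/ResearchCrossPollinationEngine | hypothesis-engine/src/agents/resource_agent.py | _parse_repositories
-- ===== SOURCE A (Python) =====
-- from typing import List, Dict, Optional
--
-- def _parse_repositories(text: str) -> List[Dict]:
--     """Parse repository information from text"""
--     repos = []
--     lines = text.split('\n')
--
--     current_repo = {}
--     for line in lines:
--         line = line.strip()
--
--         if ('name:' in line.lower() or 'repository:' in line.lower()) and current_repo:
--             repos.append(current_repo)
--             current_repo = {}
--
--         if 'name:' in line.lower() or 'repository:' in line.lower():
--             current_repo['name'] = line.split(':', 1)[-1].strip()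
--         elif current_repo:
--             if 'platform:' in line.lower():
--                 current_repo['platform'] = line.split(':', 1)[-1].strip()
--             elif 'language:' in line.lower():
--                 current_repo['language'] = line.split(':', 1)[-1].strip()
--             elif 'url:' in line.lower() or 'link:' in line.lower():
--                 current_repo['url'] = line.split(':', 1)[-1].strip()
--             elif 'stars:' in line.lower():
--                 current_repo['stars'] = line.split(':', 1)[-1].strip()
--
--     if current_repo:
--         repos.append(current_repo)
--
--     return repos[:10]
-- ===== SOURCE B (Python) =====
-- def _parse_repositories(text):
--     """Parse repository information from text (two-pass: cut into blocks, then parse each)."""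
--     lines = [l.strip() for l in text.split('\n')]
--
--     def is_name(l):
--         low = l.lower()
--         return 'name:' in low or 'repository:' in low
--
--     # First pass: cut the stripped lines into record-blocks, each starting at a
--     # name/repository line; lines before the first such line are dropped.
--     blocks = []
--     i, n = 0, len(lines)
--     while i < n and not is_name(lines[i]):
--         i += 1
--     while i < n:
--         j = i + 1
--         while j < n and not is_name(lines[j]):
--             j += 1
--         blocks.append(lines[i:j])
--         i = j
--
--     # Second pass: one dict per block.
--     out = []
--     for block in blocks:
--         repo = {'name': block[0].split(':', 1)[-1].strip()}
--         for line in block[1:]: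
--             low = line.lower()
--             if 'platform:' in low:
--                 repo['platform'] = line.split(':', 1)[-1].strip()
--             elif 'language:' in low:
--                 repo['language'] = line.split(':', 1)[-1].strip()
--             elif 'url:' in low or 'link:' in low:
--                 repo['url'] = line.split(':', 1)[-1].strip()
--             elif 'stars:' in low:
--                 repo['stars'] = line.split(':', 1)[-1].strip()
--         out.append(repo)
--     return out[:10]
-- ===== Notes on version B (the rewrite author's own statement) =====
-- stated objective: alternative
-- what changed: A's single-pass state machine (a mutable current_repo dict flushed whenever a new name line arrives, with a final flush) is replaced by two passes: first cut the stripped lines into record-blocks starting at each name/repository line (dropping lines before the first), then map each block to its dict via the same field chain.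
import Mathlib
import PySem

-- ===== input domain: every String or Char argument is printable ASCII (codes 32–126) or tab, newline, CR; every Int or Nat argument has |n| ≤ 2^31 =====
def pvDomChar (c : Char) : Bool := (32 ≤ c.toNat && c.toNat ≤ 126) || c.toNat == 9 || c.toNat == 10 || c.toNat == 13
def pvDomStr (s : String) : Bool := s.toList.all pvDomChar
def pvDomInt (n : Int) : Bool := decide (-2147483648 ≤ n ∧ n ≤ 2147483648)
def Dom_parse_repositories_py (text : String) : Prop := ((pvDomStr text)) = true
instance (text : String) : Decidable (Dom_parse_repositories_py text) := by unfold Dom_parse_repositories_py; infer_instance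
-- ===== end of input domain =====

-- B re-implements A's single-pass state machine as two passes — cut the stripped lines into
-- record-blocks at each name/repository line, then parse each block into its own dict —
-- same return value (objective: alternative decomposition, same cost).


-- ===== PORT A =====
-- shared primitives of both Pythons (both contain these exact expressions):
-- "'name:' in line.lower() or 'repository:' in line.lower()"
def pvIsName (line : String) : Bool :=
  PySem.Str.isIn "name:" (PySem.Str.lower line) || PySem.Str.isIn "repository:" (PySem.Str.lower line)

-- "line.split(':', 1)[-1].strip()"  ([-1] of the nonempty split result = last element;
-- the none branch is unreachable: the separator ":" is nonempty)
def pvVal (line : String) : String :=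
  match PySem.Str.splitMax? line ":" 1 with
  | some ps => PySem.Str.strip (ps.getLastD line)
  | none => line

-- the platform/language/url|link/stars elif chain (identical in both Pythons)
def pvField (d : PySem.Dict String String) (line : String) : PySem.Dict String String :=
  if PySem.Str.isIn "platform:" (PySem.Str.lower line) then d.insert "platform" (pvVal line)
  else if PySem.Str.isIn "language:" (PySem.Str.lower line) then d.insert "language" (pvVal line)
  else if PySem.Str.isIn "url:" (PySem.Str.lower line) || PySem.Str.isIn "link:" (PySem.Str.lower line) then
    d.insert "url" (pvVal line)
  else if PySem.Str.isIn "stars:" (PySem.Str.lower line) then d.insert "stars" (pvVal line)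
  else d

-- A's loop body: strip, flush current_repo on a fresh name line, then the if/elif chain
def pvStepA (st : List (PySem.Dict String String) × PySem.Dict String String) (rawline : String) :
    List (PySem.Dict String String) × PySem.Dict String String :=
  let line := PySem.Str.strip rawline
  let repos := st.1
  let cur := st.2
  let st1 := if pvIsName line && !cur.items.isEmpty then (repos ++ [cur], (PySem.Dict.empty : PySem.Dict String String)) else (repos, cur)
  if pvIsName line then (st1.1, st1.2.insert "name" (pvVal line))
  else if !st1.2.items.isEmpty then (st1.1, pvField st1.2 line)
  else st1

def parse_repositories_py (text : String) : List (List (String × String)) :=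
  -- lines = text.split('\n')  (split? with sep "\n" ≠ "" always returns some)
  let lines := (PySem.Str.split? text "\n").getD [text]
  let st := lines.foldl pvStepA ([], (PySem.Dict.empty : PySem.Dict String String))
  let repos := if !st.2.items.isEmpty then st.1 ++ [st.2] else st.1
  -- return repos[:10]  (dicts rendered as their item lists under the type convention)
  (PySem.List.slice repos none (some 10)).map PySem.Dict.items

-- ===== PORT B =====
-- first pass of Source B: the two index-scanning while loops, ported exactly as
-- takeWhile/dropWhile (j is the index of the next name-line, so lines[i:j] is the
-- opening line plus the following non-name lines, and lines before the first
-- name-line are skipped)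
def pvBlocks (ls : List String) : List (List String) :=
  match ls with
  | [] => []
  | l :: rest =>
    if pvIsName l then
      (l :: rest.takeWhile (fun x => !pvIsName x)) :: pvBlocks (rest.dropWhile (fun x => !pvIsName x))
    else pvBlocks rest
termination_by ls.length
decreasing_by
  · have := List.length_dropWhile_le (fun x => !pvIsName x) rest
    simp; omega
  · simp

-- second pass of Source B: one dict per block ({'name': block[0]…} then the field chain on block[1:];
-- blocks are never empty, so headD's default is unreachable)
def pvParseBlock (block : List String) : PySem.Dict String String :=
  (block.drop 1).foldl pvField
    ((PySem.Dict.empty : PySem.Dict String String).insert "name" (pvVal (block.headD "")))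

def parse_repositories_py_alt (text : String) : List (List (String × String)) :=
  let lines := ((PySem.Str.split? text "\n").getD [text]).map PySem.Str.strip
  let out := (pvBlocks lines).map pvParseBlock
  (PySem.List.slice out none (some 10)).map PySem.Dict.items

-- ===== PRECONDITION & SPEC =====
def Spec_parse_repositories_py (text : String) (out : List (List (String × String))) : Prop := out = parse_repositories_py_alt text
instance (text : String) (out : List (List (String × String))) : Decidable (Spec_parse_repositories_py text out) := by unfold Spec_parse_repositories_py; infer_instance

-- ===== CLAIM (what is proved, stated in full; the proofs are below) =====
def Claim_equal_parse_repositories_py : Prop := ∀ (text : String), Dom_parse_repositories_py text → Spec_parse_repositories_py text (parse_repositories_py text)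

-- ===== LEMMAS AND PROOFS =====

-- A's epilogue ("if current_repo: repos.append(current_repo)") on a loop state
def pvFinish (st : List (PySem.Dict String String) × PySem.Dict String String) :
    List (PySem.Dict String String) :=
  if !st.2.items.isEmpty then st.1 ++ [st.2] else st.1

-- B's view of the run from the middle of a block: finish the current dict on the
-- remaining non-name lines, then parse the remaining blocks
def pvCont (cur : PySem.Dict String String) (mls : List String) :
    List (PySem.Dict String String) :=
  ((mls.takeWhile (fun x => !pvIsName x)).foldl pvField cur)
    :: (pvBlocks (mls.dropWhile (fun x => !pvIsName x))).map pvParseBlock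

theorem pv_insert_items_ne_nil (d : PySem.Dict String String) (k v : String) :
    (d.insert k v).items ≠ [] := by
  simp only [PySem.Dict.insert]
  split
  · rename_i hc
    intro h
    simp only [List.map_eq_nil_iff] at h
    rw [PySem.Dict.contains, h] at hc
    simp at hc
  · simp

theorem pv_field_items_ne_nil (d : PySem.Dict String String) (line : String)
    (h : d.items ≠ []) : (pvField d line).items ≠ [] := by
  unfold pvField
  repeat' split
  all_goals first | exact pv_insert_items_ne_nil _ _ _ | exact h

-- main invariant: from any state whose current dict is nonempty, A's remaining loop
-- plus epilogue produces exactly B's continuation on the stripped remaining lines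
theorem pv_main (ls : List String) : ∀ (repos : List (PySem.Dict String String))
    (cur : PySem.Dict String String), cur.items ≠ [] →
    pvFinish (ls.foldl pvStepA (repos, cur)) = repos ++ pvCont cur (ls.map PySem.Str.strip) := by
  induction ls with
  | nil =>
    intro repos cur h
    simp [pvFinish, pvCont, pvBlocks, h]
  | cons r ls ih =>
    intro repos cur h
    by_cases hn : pvIsName (PySem.Str.strip r) = true
    · have hstep : pvStepA (repos, cur) r
          = (repos ++ [cur], (PySem.Dict.empty : PySem.Dict String String).insert "name" (pvVal (PySem.Str.strip r))) := by
        simp [pvStepA, hn, h]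
      rw [List.foldl_cons, hstep, ih _ _ (pv_insert_items_ne_nil _ _ _)]
      simp [pvCont, hn, pvBlocks, pvParseBlock]
    · have hstep : pvStepA (repos, cur) r = (repos, pvField cur (PySem.Str.strip r)) := by
        simp [pvStepA, hn, h]
      rw [List.foldl_cons, hstep, ih _ _ (pv_field_items_ne_nil _ _ h)]
      simp [pvCont, hn]

theorem pv_run (ls : List String) :
    pvFinish (ls.foldl pvStepA ([], (PySem.Dict.empty : PySem.Dict String String)))
      = (pvBlocks (ls.map PySem.Str.strip)).map pvParseBlock := by
  induction ls with
  | nil => simp [pvFinish, pvBlocks, PySem.Dict.empty]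
  | cons r ls ih =>
    by_cases hn : pvIsName (PySem.Str.strip r) = true
    · have hstep : pvStepA ([], (PySem.Dict.empty : PySem.Dict String String)) r
          = ([], (PySem.Dict.empty : PySem.Dict String String).insert "name" (pvVal (PySem.Str.strip r))) := by
        simp [pvStepA, hn, PySem.Dict.empty]
      rw [List.foldl_cons, hstep, pv_main _ _ _ (pv_insert_items_ne_nil _ _ _)]
      simp [pvCont, pvBlocks, hn, pvParseBlock]
    · have hstep : pvStepA ([], (PySem.Dict.empty : PySem.Dict String String)) r
          = ([], (PySem.Dict.empty : PySem.Dict String String)) := by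
        simp [pvStepA, hn, PySem.Dict.empty]
      rw [List.foldl_cons, hstep, ih]
      simp [pvBlocks, hn]

-- ===== VERDICT (by name: the statement is the Claim_ definition above) =====
theorem parse_repositories_py_spec : Claim_equal_parse_repositories_py := by
  intro text _
  unfold Spec_parse_repositories_py parse_repositories_py parse_repositories_py_alt
  have := pv_run ((PySem.Str.split? text "\n").getD [text])
  simp only [pvFinish] at this
  simp only [this]
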